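-- pv_equiv track=rewrite | github.com/serenalyoko/humantraffcking | data_processing.py | extract_domain
-- ===== SOURCE A (Python) =====
-- def extract_domain(url):
--     domain = ""
--     count = 0
--     for i in range(len(url)):
--         char = url[i]
--         if count < 3:
--             domain += char
--         if char == "/":
--             count += 1
--     return domain
-- ===== SOURCE B (Python) =====
-- def extract_domain(url):
--     parts = url.split('/')
--     if len(parts) <= 3:
--         return url
--     return '/'.join(parts[:3]) + '/'
-- ===== Notes on version B (the rewrite author's own statement) =====
-- stated objective: simpler
-- what changed: Replaced A's per-character accumulation loop with a slash counter by tokenising the url on the slash separator and rejoining the first three segments plus the trailing separator.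
import Mathlib
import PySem

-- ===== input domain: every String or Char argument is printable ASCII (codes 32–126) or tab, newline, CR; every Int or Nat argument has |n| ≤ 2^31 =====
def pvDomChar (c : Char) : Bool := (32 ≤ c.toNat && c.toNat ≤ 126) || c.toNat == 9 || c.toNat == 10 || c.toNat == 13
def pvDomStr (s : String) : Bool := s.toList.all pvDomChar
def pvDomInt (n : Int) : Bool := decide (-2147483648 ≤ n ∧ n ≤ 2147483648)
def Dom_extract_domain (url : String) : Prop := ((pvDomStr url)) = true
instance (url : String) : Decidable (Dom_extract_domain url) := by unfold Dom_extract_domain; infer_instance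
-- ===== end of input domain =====

-- B replaces A's per-character accumulation with a slash-counter by split('/')/join of the
-- first three segments (objective: simpler); same return value on every input.

-- ===== PORT A =====
-- for i in range(len(url)): char = url[i]; if count < 3: domain += char; if char == "/": count += 1
def extract_domain (url : String) : String :=
  let s := url.toList
  let r := (PySem.List.pyRange 0 (PySem.Str.len url) 1).foldl
    (fun (st : List Char × Int) i =>
      let char := PySem.List.pyGetD s i ' '   -- url[i]; i is always in range here
      ((if st.2 < 3 then st.1 ++ [char] else st.1),
       (if char = '/' then st.2 + 1 else st.2)))
    ([], (0 : Int))
  String.ofList r.1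

-- ===== PORT B =====
-- parts = url.split('/'); if len(parts) <= 3: return url; return '/'.join(parts[:3]) + '/'
def extract_domain_alt (url : String) : String :=
  let parts := PySem.Chars.splitOn url.toList ['/']
  if parts.length ≤ 3 then url
  else String.ofList (PySem.Chars.join ['/'] (parts.take 3) ++ ['/'])

-- ===== PRECONDITION & SPEC =====
def Spec_extract_domain (url : String) (out : String) : Prop := out = extract_domain_alt url
instance (url : String) (out : String) : Decidable (Spec_extract_domain url out) := by unfold Spec_extract_domain; infer_instance

-- ===== CLAIM (what is proved, stated in full; the proofs are below) =====
def Claim_equal_extract_domain : Prop := ∀ (url : String), Dom_extract_domain url → Spec_extract_domain url (extract_domain url)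

-- ===== LEMMAS AND PROOFS =====

-- A's loop body as a named step function (definitionally the lambda in the port).
def edStep (st : List Char × Int) (ch : Char) : List Char × Int :=
  ((if st.2 < 3 then st.1 ++ [ch] else st.1), (if ch = '/' then st.2 + 1 else st.2))

-- the prefix of l up to and including its n-th '/' (all of l if it has fewer than n slashes)
def takeThru : Nat → List Char → List Char
  | _, [] => []
  | 0, _ :: _ => []
  | n+1, c :: xs => c :: (if c = '/' then takeThru n xs else takeThru (n+1) xs)

lemma takeThru_nil (n : Nat) : takeThru n [] = [] := by cases n <;> rfl

lemma takeThru_zero (l : List Char) : takeThru 0 l = [] := by cases l <;> rfl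

lemma takeThru_cons (n : Nat) (c : Char) (xs : List Char) :
    takeThru (n+1) (c :: xs) = c :: (if c = '/' then takeThru n xs else takeThru (n+1) xs) := rfl

lemma edStep_foldl_sat (l : List Char) (d : List Char) (c : Int) (h : 3 ≤ c) :
    (l.foldl edStep (d, c)).1 = d := by
  induction l generalizing d c with
  | nil => rfl
  | cons ch xs ih =>
      simp only [List.foldl_cons, edStep]
      rw [if_neg (by omega)]
      split
      · exact ih d (c+1) (by omega)
      · exact ih d c h

lemma edStep_foldl (l : List Char) (d : List Char) (c : Int) (h0 : 0 ≤ c) (h3 : c < 3) :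
    (l.foldl edStep (d, c)).1 = d ++ takeThru (3 - c).toNat l := by
  induction l generalizing d c with
  | nil => simp [takeThru_nil]
  | cons ch xs ih =>
      simp only [List.foldl_cons, edStep, if_pos h3]
      have hn : (3 - c).toNat = ((3 - c).toNat - 1) + 1 := by omega
      rw [hn, takeThru_cons]
      by_cases hch : ch = '/'
      · rw [if_pos hch, if_pos hch]
        by_cases hc2 : c + 1 < 3
        · rw [ih (d ++ [ch]) (c+1) (by omega) hc2]
          have : (3 - (c+1)).toNat = (3 - c).toNat - 1 := by omega
          rw [this]; simp
        · have hc2' : (3:Int) ≤ c + 1 := by omega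
          rw [edStep_foldl_sat xs (d ++ [ch]) (c+1) hc2']
          have : (3 - c).toNat - 1 = 0 := by omega
          rw [this, takeThru_zero]
      · rw [if_neg hch, if_neg hch, ih (d ++ [ch]) c h0 h3]
        rw [← hn]; simp

-- PySem's split on the one-character separator "/" is List.splitOnP (· == '/')
lemma splitOn_go_spec (l : List Char) (fuel : Nat) (cur : List Char) (acc : List (List Char))
    (h : l.length ≤ fuel) :
    PySem.Chars.splitOn.go ['/'] fuel l cur acc
      = acc.reverse ++ List.modifyHead (cur.reverse ++ ·) (List.splitOnP (· == '/') l) := by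
  induction l generalizing fuel cur acc with
  | nil =>
      cases fuel <;> simp [PySem.Chars.splitOn.go, List.splitOnP_nil]
  | cons ch xs ih =>
      obtain ⟨f, rfl⟩ : ∃ f, fuel = f + 1 := ⟨fuel - 1, by simp at h; omega⟩
      by_cases hch : ch = '/'
      · subst hch
        rw [show PySem.Chars.splitOn.go ['/'] (f+1) ('/' :: xs) cur acc
              = PySem.Chars.splitOn.go ['/'] f xs [] (cur.reverse :: acc) by
            simp [PySem.Chars.splitOn.go, List.isPrefixOf]]
        rw [ih f [] (cur.reverse :: acc) (by simp at h; omega)]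
        rw [List.splitOnP_cons]
        obtain ⟨hd, tl, hP⟩ := List.exists_cons_of_ne_nil (List.splitOnP_ne_nil (· == '/') xs)
        rw [hP]
        simp [List.modifyHead]
      · rw [show PySem.Chars.splitOn.go ['/'] (f+1) (ch :: xs) cur acc
              = PySem.Chars.splitOn.go ['/'] f xs (ch :: cur) acc by
            simp [PySem.Chars.splitOn.go, List.isPrefixOf, Ne.symm hch]]
        rw [ih f (ch :: cur) acc (by simp at h; omega)]
        rw [List.splitOnP_cons, if_neg (by simp [hch]), List.modifyHead_modifyHead]
        obtain ⟨hd, tl, hP⟩ := List.exists_cons_of_ne_nil (List.splitOnP_ne_nil (· == '/') xs)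
        rw [hP]
        simp [List.modifyHead]

lemma splitOn_eq (l : List Char) :
    PySem.Chars.splitOn l ['/'] = List.splitOnP (· == '/') l := by
  rw [PySem.Chars.splitOn, splitOn_go_spec l (l.length + 1) [] [] (by omega)]
  obtain ⟨hd, tl, hP⟩ := List.exists_cons_of_ne_nil (List.splitOnP_ne_nil (· == '/') l)
  rw [hP]; simp [List.modifyHead]

lemma intercalate_cons_cons (sep a b : List Char) (t : List (List Char)) :
    List.intercalate sep (a :: b :: t) = a ++ sep ++ List.intercalate sep (b :: t) := by
  simp [List.intercalate, List.intersperse]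

-- takeThru in terms of split-then-rejoin
lemma takeThru_split (l : List Char) (n : Nat) :
    takeThru (n+1) l
      = if (List.splitOnP (· == '/') l).length ≤ n+1 then l
        else List.intercalate ['/'] ((List.splitOnP (· == '/') l).take (n+1)) ++ ['/'] := by
  induction l generalizing n with
  | nil => simp [takeThru_nil, List.splitOnP_nil]
  | cons ch xs ih =>
      rw [takeThru_cons, List.splitOnP_cons]
      by_cases hch : ch = '/'
      · subst hch
        rw [if_pos rfl, if_pos (show (('/' : Char) == '/') = true from rfl)]
        cases n with
        | zero =>
            have hne := List.splitOnP_ne_nil (· == '/') xs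
            have hpos := List.length_pos_iff.mpr hne
            rw [if_neg (show ¬ ([] :: List.splitOnP (· == '/') xs).length ≤ 0+1 by
              simp; omega)]
            simp [takeThru_zero, List.intercalate]
        | succ m =>
            by_cases hlen : (List.splitOnP (· == '/') xs).length ≤ m+1
            · rw [ih m, if_pos hlen,
                if_pos (show ([] :: List.splitOnP (· == '/') xs).length ≤ m+1+1 by
                  simp; omega)]
            · rw [ih m, if_neg hlen,
                if_neg (show ¬ ([] :: List.splitOnP (· == '/') xs).length ≤ m+1+1 by
                  simp; omega)]
              rw [List.take_succ_cons]
              obtain ⟨hd, tl, hP⟩ := List.exists_cons_of_ne_nil (List.splitOnP_ne_nil (· == '/') xs)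
              rw [hP, List.take_succ_cons]
              cases htl : tl.take m with
              | nil => simp [List.intercalate]
              | cons b t =>
                  simp [intercalate_cons_cons]
      · rw [if_neg hch, if_neg (show ¬ ((ch == '/') = true) by simp [hch])]
        obtain ⟨hd, tl, hP⟩ := List.exists_cons_of_ne_nil (List.splitOnP_ne_nil (· == '/') xs)
        rw [hP, List.modifyHead]
        by_cases hlen : (hd :: tl).length ≤ n+1
        · rw [ih n, hP, if_pos hlen,
            if_pos (show ((ch :: hd) :: tl).length ≤ n+1 by simpa using hlen)]
        · rw [ih n, hP, if_neg hlen,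
            if_neg (show ¬ ((ch :: hd) :: tl).length ≤ n+1 by simpa using hlen)]
          rw [List.take_succ_cons, List.take_succ_cons]
          cases htl : tl.take n with
          | nil =>
              have hcase : tl = [] ∨ n = 0 := by
                rcases List.take_eq_nil_iff.mp htl with h | h
                · right; omega
                · left; exact h
              rcases hcase with h | h
              · simp [h] at hlen
              · subst h; simp [List.intercalate]
          | cons b t =>
              simp [intercalate_cons_cons]

lemma portA_foldl (s : List Char) :
    (PySem.List.pyRange 0 (s.length : Int) 1).foldl
      (fun (st : List Char × Int) i =>
        (if st.2 < 3 then st.1 ++ [PySem.List.pyGetD s i ' '] else st.1,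
         if PySem.List.pyGetD s i ' ' = '/' then st.2 + 1 else st.2)) ([], (0 : Int))
    = s.foldl edStep ([], (0 : Int)) :=
  PySem.List.foldl_pyRange_zero_pyGetD' s ' ' edStep ([], (0 : Int))

-- ===== VERDICT (by name: the statement is the Claim_ definition above) =====
theorem extract_domain_spec : Claim_equal_extract_domain := by
  intro url _
  unfold Spec_extract_domain
  simp only [extract_domain, extract_domain_alt, PySem.Str.len_eq]
  rw [portA_foldl url.toList, edStep_foldl url.toList [] 0 (by omega) (by omega)]
  rw [show ((3:Int) - 0).toNat = 2 + 1 by omega, takeThru_split url.toList 2, splitOn_eq]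
  simp only [PySem.Chars.join]
  by_cases hc : (List.splitOnP (· == '/') url.toList).length ≤ 3
  · rw [if_pos (by simpa using hc), if_pos (by simpa using hc)]
    simp
  · rw [if_neg (by simpa using hc), if_neg (by simpa using hc)]
    simp
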